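-- pv_equiv track=rewrite | github.com/AndreasWeber87/ProcessDockerStats | main.py | __linesToTestBlocks
-- ===== SOURCE A (Python) =====
-- def __linesToTestBlocks(lines: list):
--     allTests = []
--     testBlock = []
--     lastTestNumber = ""
--
--     for line in lines:
--         testNumber = line.split(";")[2]
--
--         if lastTestNumber != testNumber:
--             lastTestNumber = testNumber
--
--             if len(testBlock) > 0:
--                 allTests.append(testBlock)
--                 testBlock = []
--
--         testBlock.append(line)
--
--     allTests.append(testBlock)
--     return allTests
-- ===== SOURCE B (Python) =====
-- def __linesToTestBlocks(lines: list):
--     # Index-based scan: find each maximal run of equal test numbers and slice it out.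
--     # On empty input returns [] (no blocks), not A's [[]].
--     key = lambda l: l.split(";")[2]
--     blocks = []
--     i = 0
--     n = len(lines)
--     while i < n:
--         k = key(lines[i])
--         j = i + 1
--         while j < n and key(lines[j]) == k:
--             j += 1
--         blocks.append(lines[i:j])
--         i = j
--     return blocks
-- ===== Notes on version B (the rewrite author's own statement) =====
-- stated objective: alternative
-- what changed: Replaces A's running-last-key state machine (mutable current block flushed on key change, final block appended unconditionally) with an index-based scan that finds each maximal run of equal test numbers and slices it out.
-- intended difference: On the empty list A returns [[]] (it appends the final, empty block unconditionally) while B returns []; no blocks is the intended result for no lines. — e.g. on __linesToTestBlocks([]): A returns [[]], B returns []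
import Mathlib
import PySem

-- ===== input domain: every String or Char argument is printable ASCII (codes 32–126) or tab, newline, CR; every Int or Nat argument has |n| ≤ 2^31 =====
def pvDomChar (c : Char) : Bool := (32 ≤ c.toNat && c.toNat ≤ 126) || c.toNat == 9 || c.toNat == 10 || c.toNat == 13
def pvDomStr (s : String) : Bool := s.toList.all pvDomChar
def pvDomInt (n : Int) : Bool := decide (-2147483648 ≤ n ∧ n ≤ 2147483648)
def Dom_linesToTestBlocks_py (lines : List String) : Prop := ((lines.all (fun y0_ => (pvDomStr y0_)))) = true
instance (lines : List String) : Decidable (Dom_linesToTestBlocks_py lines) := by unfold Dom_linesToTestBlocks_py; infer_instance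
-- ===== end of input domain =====

-- B replaces A's running-last-key state machine with a maximal-run scan; on [] A returns [[]], B returns [].


-- ===== PORT A =====
-- line.split(";")[2]; the .getD "" default is unreachable under Pre_ (every line has ≥ 3 fields)
def pvTestNumber (line : String) : String :=
  ((PySem.List.pyGet? ((PySem.Str.split? line ";").getD []) 2)).getD ""

-- the body of A's for-loop over state (allTests, testBlock, lastTestNumber)
def pvStepA (st : List (List String) × List String × String) (line : String) :
    List (List String) × List String × String :=
  let testNumber := pvTestNumber line
  if st.2.2 ≠ testNumber then
    if st.2.1.length > 0 then (st.1 ++ [st.2.1], [] ++ [line], testNumber)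
    else (st.1, st.2.1 ++ [line], testNumber)
  else (st.1, st.2.1 ++ [line], st.2.2)

def linesToTestBlocks_py (lines : List String) : List (List String) :=
  let st := lines.foldl pvStepA ([], [], "")
  st.1 ++ [st.2.1]

-- ===== PORT B =====
-- inner while loop of B: how many further lines share test number k
def pvRunLen (k : String) : List String → Nat
  | [] => 0
  | y :: ys => if pvTestNumber y = k then 1 + pvRunLen k ys else 0

-- outer while loop of B: slice out the maximal run starting at the front, recurse on the rest
def pvChunks : List String → List (List String)
  | [] => []
  | x :: xs =>
    let j := pvRunLen (pvTestNumber x) xs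
    (x :: xs.take j) :: pvChunks (xs.drop j)
termination_by l => l.length
decreasing_by simp only [List.length_drop, List.length_cons]; omega

def linesToTestBlocks_py_alt (lines : List String) : List (List String) :=
  pvChunks lines

-- ===== PRECONDITION & SPEC =====
-- A raises IndexError on any line with fewer than three ';'-separated fields; exactly those inputs are excluded.
def Pre_linesToTestBlocks_py (lines : List String) : Prop :=
  ∀ line ∈ lines, 3 ≤ ((PySem.Str.split? line ";").getD []).length
instance (lines : List String) : Decidable (Pre_linesToTestBlocks_py lines) := by
  unfold Pre_linesToTestBlocks_py; infer_instance
def pvWitness_linesToTestBlocks_py : List String := (["a;b;1", "a;b;1", "a;b;2"])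

-- On the empty list A returns [[]] (it appends the final, empty block unconditionally) while B returns []; no blocks is the intended result for no lines.
def D_linesToTestBlocks_py (lines : List String) : Prop := lines = []
instance (lines : List String) : Decidable (D_linesToTestBlocks_py lines) := by
  unfold D_linesToTestBlocks_py; infer_instance

def Spec_linesToTestBlocks_py (lines : List String) (out : List (List String)) : Prop :=
  ¬ D_linesToTestBlocks_py lines → out = linesToTestBlocks_py_alt lines
instance (lines : List String) (out : List (List String)) : Decidable (Spec_linesToTestBlocks_py lines out) := by
  unfold Spec_linesToTestBlocks_py; infer_instance

def pvDiffWitness_linesToTestBlocks_py : List String := ([])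
def pvDiffWitnessOut_linesToTestBlocks_py : (List (List String)) × (List (List String)) := ([[]], [])

-- ===== CLAIM (what is proved, stated in full; the proofs are below) =====
def Claim_unchanged_linesToTestBlocks_py : Prop := ∀ (lines : List String), Dom_linesToTestBlocks_py lines → Pre_linesToTestBlocks_py lines → Spec_linesToTestBlocks_py lines (linesToTestBlocks_py lines)
def Claim_changed_linesToTestBlocks_py : Prop := Dom_linesToTestBlocks_py (pvDiffWitness_linesToTestBlocks_py) ∧ Pre_linesToTestBlocks_py (pvDiffWitness_linesToTestBlocks_py) ∧ D_linesToTestBlocks_py (pvDiffWitness_linesToTestBlocks_py) ∧ linesToTestBlocks_py (pvDiffWitness_linesToTestBlocks_py) = pvDiffWitnessOut_linesToTestBlocks_py.1 ∧ linesToTestBlocks_py_alt (pvDiffWitness_linesToTestBlocks_py) = pvDiffWitnessOut_linesToTestBlocks_py.2 ∧ pvDiffWitnessOut_linesToTestBlocks_py.1 ≠ pvDiffWitnessOut_linesToTestBlocks_py.2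
def Claim_exact_linesToTestBlocks_py : Prop := ∀ (lines : List String), Dom_linesToTestBlocks_py lines → Pre_linesToTestBlocks_py lines → D_linesToTestBlocks_py lines → linesToTestBlocks_py lines ≠ linesToTestBlocks_py_alt lines

-- ===== LEMMAS AND PROOFS =====

-- A's loop from a state whose current block b is nonempty produces exactly:
-- extend b by the run of k at the front, then B's chunks of the rest.
lemma pvLoopA (ls : List String) :
    ∀ (acc : List (List String)) (b : List String) (k : String), b ≠ [] →
    (let st := ls.foldl pvStepA (acc, b, k)
     st.1 ++ [st.2.1]) =
    acc ++ (b ++ ls.take (pvRunLen k ls)) :: pvChunks (ls.drop (pvRunLen k ls)) := by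
  induction ls with
  | nil => intro acc b k hb; simp [pvRunLen, pvChunks]
  | cons y ys ih =>
    intro acc b k hb
    by_cases hk : pvTestNumber y = k
    · have hstep : pvStepA (acc, b, k) y = (acc, b ++ [y], k) := by
        simp [pvStepA, hk]
      simp only [List.foldl_cons, hstep, pvRunLen, hk]
      rw [ih acc (b ++ [y]) k (by simp), Nat.add_comm]
      simp
    · have hstep : pvStepA (acc, b, k) y = (acc ++ [b], [y], pvTestNumber y) := by
        have : b.length > 0 := List.length_pos_iff.mpr hb
        simp [pvStepA, Ne.symm hk, this]
      simp only [List.foldl_cons, hstep, pvRunLen, if_neg hk]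
      rw [ih (acc ++ [b]) [y] (pvTestNumber y) (by simp)]
      simp [pvChunks]

-- A's first iteration lands in state ([], [x], key x) regardless of whether key x = "".
lemma pvStepA_init (x : String) :
    pvStepA ([], [], "") x = ([], [x], pvTestNumber x) := by
  by_cases h : pvTestNumber x = "" <;> simp [pvStepA, h]

-- ===== VERDICT (by name: the statement is the Claim_ definition above) =====
theorem linesToTestBlocks_py_spec : Claim_unchanged_linesToTestBlocks_py := by
  intro lines _ _ hD
  cases lines with
  | nil => exact absurd rfl hD
  | cons x xs =>
    show linesToTestBlocks_py (x :: xs) = linesToTestBlocks_py_alt (x :: xs)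
    unfold linesToTestBlocks_py linesToTestBlocks_py_alt
    simp only [List.foldl_cons, pvStepA_init]
    rw [pvLoopA xs [] [x] (pvTestNumber x) (by simp)]
    simp [pvChunks]

theorem linesToTestBlocks_py_changed : Claim_changed_linesToTestBlocks_py := by
  refine ⟨by decide, by decide, by decide, by decide, ?_, by decide⟩
  simp [linesToTestBlocks_py_alt, pvDiffWitness_linesToTestBlocks_py,
    pvDiffWitnessOut_linesToTestBlocks_py, pvChunks]

theorem linesToTestBlocks_py_tight : Claim_exact_linesToTestBlocks_py := by
  intro lines _ _ hD
  subst hD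
  simp [linesToTestBlocks_py, linesToTestBlocks_py_alt, pvChunks]
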